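-- pv_equiv track=rewrite | github.com/zactionn/UMich-Python3 | Activity: 14.8.2 ActiveCode (ac14_10_2).py | check_nums
-- ===== SOURCE A (Python) =====
-- def check_nums(x:list) -> list:
--     index = 0
--     sublist = []
--     while index < len(x):
--         if x[index] == 7:
--             break
--         sublist.append(x[index])
--         index += 1
--     return sublist
-- ===== SOURCE B (Python) =====
-- def check_nums(x: list) -> list:
--     if 7 in x:
--         return x[:x.index(7)]
--     return x[:]
-- ===== Notes on version B (the rewrite author's own statement) =====
-- stated objective: simpler
-- what changed: Replaces the manual index loop that appends elements one by one with a locate-then-slice form: test membership of 7 and bulk-copy the prefix x[:x.index(7)] (or the whole list) in one slice.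
import Mathlib
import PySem

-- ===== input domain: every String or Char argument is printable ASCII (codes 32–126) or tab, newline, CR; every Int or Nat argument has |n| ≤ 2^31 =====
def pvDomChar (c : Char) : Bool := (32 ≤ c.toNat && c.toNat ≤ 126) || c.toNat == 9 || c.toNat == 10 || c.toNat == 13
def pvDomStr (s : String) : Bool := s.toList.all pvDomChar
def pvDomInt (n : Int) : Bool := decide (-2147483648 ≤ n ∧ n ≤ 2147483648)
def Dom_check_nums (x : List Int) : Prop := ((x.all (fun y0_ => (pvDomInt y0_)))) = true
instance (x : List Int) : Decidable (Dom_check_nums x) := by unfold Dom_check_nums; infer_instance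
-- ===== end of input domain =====

-- B replaces A's element-by-element append loop by a locate-then-slice form (simpler).

-- ===== PORT A =====
-- A's while loop: index runs over x, appending x[index] to sublist until x[index] == 7.
def checkNumsLoop (x : List Int) (index : Nat) (sublist : List Int) : List Int :=
  if h : index < x.length then
    if x[index] = 7 then sublist
    else checkNumsLoop x (index + 1) (sublist ++ [x[index]])
  else sublist
termination_by x.length - index

def check_nums (x : List Int) : List Int := checkNumsLoop x 0 []

-- ===== PORT B =====
def check_nums_alt (x : List Int) : List Int :=
  if (7 : Int) ∈ x then
    match PySem.List.index? x 7 with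
    | some i => PySem.List.slice x none (some (i : Int))
    | none => []
  else x

-- ===== PRECONDITION & SPEC =====
def Spec_check_nums (x : List Int) (out : List Int) : Prop := out = check_nums_alt x
instance (x : List Int) (out : List Int) : Decidable (Spec_check_nums x out) := by unfold Spec_check_nums; infer_instance

-- ===== CLAIM (what is proved, stated in full; the proofs are below) =====
def Claim_equal_check_nums : Prop := ∀ (x : List Int), Dom_check_nums x → Spec_check_nums x (check_nums x)

-- ===== LEMMAS AND PROOFS =====

-- A's loop from index i produces sublist ++ takeWhile (≠ 7) of the remaining suffix.
theorem checkNumsLoop_eq (x : List Int) (i : Nat) (sub : List Int) :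
    checkNumsLoop x i sub = sub ++ (x.drop i).takeWhile (fun a => a != 7) := by
  by_cases h : i < x.length
  · rw [checkNumsLoop, dif_pos h, List.drop_eq_getElem_cons h, List.takeWhile_cons]
    by_cases h7 : x[i] = 7
    · simp [h7]
    · have := checkNumsLoop_eq x (i + 1) (sub ++ [x[i]])
      simp [h7, this]
  · rw [checkNumsLoop, dif_neg h, List.drop_eq_nil_of_le (by omega)]
    simp
termination_by x.length - i

-- B computes the same takeWhile, by structural induction on x.
theorem check_nums_alt_eq (x : List Int) :
    check_nums_alt x = x.takeWhile (fun a => a != 7) := by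
  induction x with
  | nil => simp [check_nums_alt]
  | cons a t ih =>
    by_cases ha : a = 7
    · subst ha
      rw [check_nums_alt, if_pos (List.mem_cons_self ..), PySem.List.index?_cons_self]
      simp [PySem.List.slice]
    · rw [check_nums_alt]
      by_cases hm : (7 : Int) ∈ t
      · cases hk : PySem.List.index? t 7 with
        | none => exact absurd ((PySem.List.index?_eq_none_iff t 7).mp hk) (by simpa using hm)
        | some k =>
          rw [if_pos (List.mem_cons_of_mem _ hm), PySem.List.index?_cons_of_ne t ha, hk]
          simp only [Option.map_some]
          rw [PySem.List.slice_to_natCast]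
          rw [check_nums_alt, if_pos hm, hk] at ih
          simp only [PySem.List.slice_to_natCast] at ih
          rw [List.takeWhile_cons]
          simp [ha, List.take_succ_cons, ih]
      · have hnm : (7 : Int) ∉ a :: t := by simp [hm, Ne.symm ha]
        rw [if_neg hnm, List.takeWhile_cons]
        rw [check_nums_alt, if_neg hm] at ih
        simp [ha, ← ih]

-- ===== VERDICT (by name: the statement is the Claim_ definition above) =====
theorem check_nums_spec : Claim_equal_check_nums := by
  intro x _
  unfold Spec_check_nums check_nums
  rw [checkNumsLoop_eq, check_nums_alt_eq]
  simp
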